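-- pv_equiv track=rewrite | github.com/LinoVarela/Data-Representation-and-Serialization-Formats | XmlVsJson/xmlvsjson/files/generator.py | generate_school_data
-- ===== SOURCE A (Python) =====
-- def generate_school_data(num_students):
--     school_data = []
--     school_counter = 1
--     student_counter = 1
--
--     while student_counter <= num_students:
--         school_data.append(f"School: School_{school_counter}")
--         for i in range(10):  #each school has 10 students
--             if student_counter <= num_students:
--                 school_data.append(f"{student_counter} Student_{student_counter}")
--                 student_counter += 1
--         school_counter += 1
--
--     return '\n'.join(school_data)
-- ===== SOURCE B (Python) =====
-- def generate_school_data(num_students):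
--     students = [f"{i} Student_{i}" for i in range(1, num_students + 1)]
--     chunks = [students[p:p + 10] for p in range(0, len(students), 10)]
--     blocks = [f"School: School_{k + 1}\n" + "\n".join(c) for k, c in enumerate(chunks)]
--     return "\n".join(blocks)
-- ===== Notes on version B (the rewrite author's own statement) =====
-- stated objective: alternative
-- what changed: Replaces A's single counter-threaded nested while/for loop with three staged passes: materialize the flat list of numbered student lines, split it into chunks of ten by slicing, then prefix each chunk with its header via enumerate and join; no shared counters are threaded at all.
import Mathlib
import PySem

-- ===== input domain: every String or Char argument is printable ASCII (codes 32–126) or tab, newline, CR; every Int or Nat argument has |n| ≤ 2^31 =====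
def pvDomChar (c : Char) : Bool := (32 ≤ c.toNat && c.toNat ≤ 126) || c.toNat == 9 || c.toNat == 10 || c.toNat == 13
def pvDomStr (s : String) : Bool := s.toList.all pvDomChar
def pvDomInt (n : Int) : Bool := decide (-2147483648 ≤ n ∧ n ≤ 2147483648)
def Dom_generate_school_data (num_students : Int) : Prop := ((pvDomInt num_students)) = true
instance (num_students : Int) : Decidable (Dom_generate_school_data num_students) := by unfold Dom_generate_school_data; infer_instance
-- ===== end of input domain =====

-- B rebuilds the roster in three staged passes (flat student-line list, chunks of ten by
-- slicing, headers prefixed per chunk) instead of A's counter-threaded nested loop;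
-- same cost, different decomposition.

-- ===== PORT A =====
-- inner 'for i in range(10)' of A, counting the 10 iterations; state = (school_data, student_counter)
def pvInnerA (n : Int) : Nat → Int → List String → (List String × Int)
  | 0, sc, acc => (acc, sc)
  | m+1, sc, acc =>
      if sc ≤ n then pvInnerA n m (sc+1) (acc ++ [PySem.Int.toStr sc ++ " Student_" ++ PySem.Int.toStr sc])
      else pvInnerA n m sc acc

-- termination helper for the while loop (cited in decreasing_by)
theorem pvInnerA_le (n : Int) (m : Nat) (sc : Int) (acc : List String) :
    sc ≤ (pvInnerA n m sc acc).2 := by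
  induction m generalizing sc acc with
  | zero => simp [pvInnerA]
  | succ m ih =>
      simp only [pvInnerA]
      split
      · exact le_trans (by omega) (ih (sc+1) _)
      · exact ih sc acc

theorem pvInnerA_lt (n : Int) (m : Nat) (hm : 0 < m) (sc : Int) (acc : List String)
    (h : sc ≤ n) : sc < (pvInnerA n m sc acc).2 := by
  cases m with
  | zero => omega
  | succ m =>
      simp only [pvInnerA, if_pos h]
      exact lt_of_lt_of_le (by omega) (pvInnerA_le n m (sc+1) _)

-- A's while loop
def pvLoopA (n school sc : Int) (acc : List String) : List String :=
  if h : sc ≤ n then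
    let r := pvInnerA n 10 sc (acc ++ ["School: School_" ++ PySem.Int.toStr school])
    pvLoopA n (school+1) r.2 r.1
  else acc
termination_by (n + 1 - sc).toNat
decreasing_by
  have := pvInnerA_lt n 10 (by norm_num) sc (acc ++ ["School: School_" ++ PySem.Int.toStr school]) h
  omega

def generate_school_data (num_students : Int) : String :=
  PySem.Str.join "\n" (pvLoopA num_students 1 1 [])

-- ===== PORT B =====
def generate_school_data_alt (num_students : Int) : String :=
  let students := (PySem.List.pyRange 1 (num_students + 1) 1).map
      (fun i => PySem.Int.toStr i ++ " Student_" ++ PySem.Int.toStr i)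
  let chunks := (PySem.List.pyRange 0 (students.length : Int) 10).map
      (fun p => PySem.List.slice students (some p) (some (p + 10)))
  let blocks := (PySem.List.enumerate chunks 0).map
      (fun kc => "School: School_" ++ PySem.Int.toStr (kc.1 + 1) ++ "\n" ++ PySem.Str.join "\n" kc.2)
  PySem.Str.join "\n" blocks

-- ===== PRECONDITION & SPEC =====
def Spec_generate_school_data (num_students : Int) (out : String) : Prop := out = generate_school_data_alt num_students
instance (num_students : Int) (out : String) : Decidable (Spec_generate_school_data num_students out) := by unfold Spec_generate_school_data; infer_instance

-- ===== CLAIM =====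
def Claim_equal_generate_school_data : Prop := ∀ (num_students : Int), Dom_generate_school_data num_students → Spec_generate_school_data num_students (generate_school_data num_students)

-- ===== LEMMAS AND PROOFS =====

-- the lines contributed by school index s (header + numbered students of that school)
def pvBlock (n s : Int) : List String :=
  ("School: School_" ++ PySem.Int.toStr (s + 1)) ::
    (PySem.List.pyRange (s * 10 + 1) (min ((s + 1) * 10) n + 1) 1).map
      (fun i => PySem.Int.toStr i ++ " Student_" ++ PySem.Int.toStr i)

theorem pvInnerA_spec (n : Int) (m : Nat) (sc : Int) (acc : List String) (h : sc ≤ n + 1) :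
    pvInnerA n m sc acc =
      (acc ++ (PySem.List.pyRange sc (min (sc + m) (n + 1)) 1).map
          (fun i => PySem.Int.toStr i ++ " Student_" ++ PySem.Int.toStr i),
        min (sc + m) (n + 1)) := by
  induction m generalizing sc acc with
  | zero =>
      have h1 : min (sc + (0:Nat)) (n+1) = sc := by omega
      rw [pvInnerA, h1]
      simp [PySem.List.pyRange_one_eq_nil (le_refl sc)]
  | succ m ih =>
      rw [pvInnerA]
      by_cases hsc : sc ≤ n
      · rw [if_pos hsc, ih (sc+1) _ (by omega)]
        have hcons : PySem.List.pyRange sc (min (sc + (m+1:Nat)) (n+1)) 1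
            = sc :: PySem.List.pyRange (sc+1) (min (sc + (m+1:Nat)) (n+1)) 1 :=
          PySem.List.pyRange_one_cons (by push_cast; omega)
        have hmin : min (sc + 1 + (m:Int)) (n+1) = min (sc + ((m:Int)+1)) (n+1) := by omega
        rw [hcons]
        push_cast
        rw [hmin]
        simp
      · rw [if_neg hsc, ih sc acc h]
        have hsc' : sc = n + 1 := by omega
        have h1 : min (sc + (m:Int)) (n+1) = sc := by omega
        have h2 : min (sc + ((m:Int)+1)) (n+1) = sc := by omega
        push_cast
        rw [h1, h2, PySem.List.pyRange_one_eq_nil (le_refl sc)]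

theorem pvLoopA_eq (n : Int) (m k : Nat) (acc : List String)
    (hm : (PySem.Int.floordiv (n + 9) 10 - k).toNat ≤ m) :
    pvLoopA n ((k : Int) + 1) (10 * k + 1) acc
      = acc ++ (PySem.List.pyRange k (PySem.Int.floordiv (n + 9) 10) 1).flatMap (pvBlock n) := by
  have hd : PySem.Int.floordiv (n + 9) 10 = (n + 9) / 10 :=
    PySem.Int.floordiv_eq_ediv_of_pos (by norm_num)
  induction m generalizing k acc with
  | zero =>
      have hk : ¬ (10 * (k : Int) + 1 ≤ n) := by omega
      rw [pvLoopA, dif_neg hk,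
        PySem.List.pyRange_one_eq_nil (by omega : PySem.Int.floordiv (n + 9) 10 ≤ (k : Int))]
      simp
  | succ m ih =>
      by_cases hle : 10 * (k : Int) + 1 ≤ n
      · have hkd : (k : Int) < PySem.Int.floordiv (n + 9) 10 := by omega
        rw [pvLoopA, dif_pos hle]
        rw [pvInnerA_spec n 10 (10 * (k : Int) + 1) _ (by omega)]
        rw [PySem.List.pyRange_one_cons hkd, List.flatMap_cons]
        by_cases h2 : 10 * ((k : Int) + 1) + 1 ≤ n
        · -- not the last school: the counter lands exactly on the next school's first index
          have hmin : min (10 * (k : Int) + 1 + ((10:Nat) : Int)) (n + 1) = 10 * ((k:Int) + 1) + 1 := by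
            push_cast; omega
          have hmin2 : min (((k : Int) + 1) * 10) n + 1 = 10 * ((k:Int) + 1) + 1 := by omega
          have harg : (k : Int) * 10 + 1 = 10 * (k : Int) + 1 := by ring
          rw [hmin]
          have hrec := ih (k + 1)
            (acc ++ ["School: School_" ++ PySem.Int.toStr ((k : Int) + 1)] ++
              (PySem.List.pyRange (10 * (k : Int) + 1) (10 * ((k:Int) + 1) + 1) 1).map
                (fun i => PySem.Int.toStr i ++ " Student_" ++ PySem.Int.toStr i))
            (by omega)
          push_cast at hrec
          refine hrec.trans ?_
          simp [pvBlock, harg, hmin2]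
        · -- last school: the counter is clamped to n+1 and the next while test fails
          have hmin : min (10 * (k : Int) + 1 + ((10:Nat) : Int)) (n + 1) = n + 1 := by
            push_cast; omega
          have hmin2 : min (((k : Int) + 1) * 10) n + 1 = n + 1 := by omega
          have harg : (k : Int) * 10 + 1 = 10 * (k : Int) + 1 := by ring
          have hnil : PySem.List.pyRange ((k : Int) + 1) (PySem.Int.floordiv (n + 9) 10) 1 = [] :=
            PySem.List.pyRange_one_eq_nil (by omega)
          rw [hmin, hnil]
          conv_lhs => rw [pvLoopA]
          rw [dif_neg (by omega : ¬ (n + 1 ≤ n))]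
          simp [pvBlock, harg, hmin2]
      · rw [pvLoopA, dif_neg hle,
          PySem.List.pyRange_one_eq_nil (by omega : PySem.Int.floordiv (n + 9) 10 ≤ (k : Int))]
        simp

-- ## intercalate lemmas (char level) for the double join

theorem pvIntercalate_cons₂ (sep x y : List Char) (t : List (List Char)) :
    List.intercalate sep (x :: y :: t) = x ++ sep ++ List.intercalate sep (y :: t) := by
  simp [List.intercalate, List.intersperse]

theorem pvIntercalate_cons (sep x : List Char) (l : List (List Char)) (hl : l ≠ []) :
    List.intercalate sep (x :: l) = x ++ sep ++ List.intercalate sep l := by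
  cases l with
  | nil => exact absurd rfl hl
  | cons y t => exact pvIntercalate_cons₂ sep x y t

theorem pvIntercalate_append (sep : List Char) (g ys : List (List Char)) (hg : g ≠ []) :
    List.intercalate sep (g ++ ys)
      = List.intercalate sep g ++ (if ys = [] then [] else sep ++ List.intercalate sep ys) := by
  induction g with
  | nil => exact absurd rfl hg
  | cons x g' ih =>
      cases g' with
      | nil =>
          cases ys with
          | nil => simp [List.intercalate]
          | cons y t => simp [List.intercalate]
      | cons z t =>
          have h1 : (z :: t) ++ ys ≠ [] := by simp
          rw [List.cons_append, pvIntercalate_cons sep x _ h1, ih (by simp),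
            pvIntercalate_cons sep x (z :: t) (by simp)]
          simp [List.append_assoc]

theorem pvIntercalate_flat (sep : List Char) (css : List (List (List Char)))
    (h : ∀ g ∈ css, g ≠ []) :
    List.intercalate sep (css.map (List.intercalate sep)) = List.intercalate sep css.flatten := by
  induction css with
  | nil => simp
  | cons g rest ih =>
      have hg : g ≠ [] := h g (by simp)
      have hrest : ∀ g' ∈ rest, g' ≠ [] := fun g' hm => h g' (by simp [hm])
      cases rest with
      | nil => simp [List.intercalate]
      | cons r t =>
          have hflat : (r :: t).flatten ≠ [] := by
            have : r ≠ [] := hrest r (by simp)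
            simp [List.flatten]
            intro hr; exact absurd hr this
          rw [List.map_cons, pvIntercalate_cons sep _ _ (by simp), ih hrest]
          conv_rhs => rw [List.flatten_cons, pvIntercalate_append sep g _ hg, if_neg hflat]
          simp [List.append_assoc]

theorem pvJoin_cons (h : String) (c : List String) (hc : c ≠ []) :
    PySem.Str.join "\n" (h :: c) = h ++ "\n" ++ PySem.Str.join "\n" c := by
  apply String.toList_inj.mp
  rw [PySem.Str.toList_join]
  have : (h ++ "\n" ++ PySem.Str.join "\n" c).toList
      = h.toList ++ "\n".toList ++ (PySem.Str.join "\n" c).toList := by simp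
  rw [this, PySem.Str.toList_join, List.map_cons]
  exact pvIntercalate_cons "\n".toList h.toList (c.map String.toList) (by simpa using hc)

theorem pvStrJoinFlat (Gs : List (List String)) (h : ∀ g ∈ Gs, g ≠ []) :
    PySem.Str.join "\n" (Gs.map (PySem.Str.join "\n")) = PySem.Str.join "\n" Gs.flatten := by
  apply String.toList_inj.mp
  rw [PySem.Str.toList_join, PySem.Str.toList_join, List.map_map]
  have h1 : Gs.map (String.toList ∘ PySem.Str.join "\n")
      = (Gs.map (List.map String.toList)).map (List.intercalate "\n".toList) := by
    rw [List.map_map]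
    exact List.map_congr_left (fun g _ => by
      show (PySem.Str.join "\n" g).toList = _
      rw [PySem.Str.toList_join]; rfl)
  simp only [PySem.Chars.join]
  rw [h1, pvIntercalate_flat _ _ (by
    intro g hm
    rcases List.mem_map.mp hm with ⟨g0, hg0, rfl⟩
    simpa using h g0 hg0)]
  rw [← List.map_flatten]

-- ## pyRange drop/take (for B's slicing of the flat list)

theorem pvRange_drop (j : Nat) : ∀ (a b : Int),
    (PySem.List.pyRange a b 1).drop j = PySem.List.pyRange (a + j) b 1 := by
  induction j with
  | zero => intro a b; simp
  | succ j ih =>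
      intro a b
      by_cases hab : a < b
      · rw [PySem.List.pyRange_one_cons hab, List.drop_succ_cons, ih (a+1) b]
        congr 1; push_cast; ring
      · rw [PySem.List.pyRange_one_eq_nil (by omega),
          PySem.List.pyRange_one_eq_nil (by push_cast; omega)]
        simp

theorem pvRange_take (m : Nat) : ∀ (a b : Int),
    (PySem.List.pyRange a b 1).take m = PySem.List.pyRange a (min (a + m) b) 1 := by
  induction m with
  | zero =>
      intro a b
      rw [show ((0:Nat):Int) = 0 from rfl]
      rw [PySem.List.pyRange_one_eq_nil (by omega : min (a + 0) b ≤ a)]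
      simp
  | succ m ih =>
      intro a b
      by_cases hab : a < b
      · rw [PySem.List.pyRange_one_cons hab, List.take_succ_cons, ih (a+1) b,
          PySem.List.pyRange_one_cons (show a < min (a + ((m+1:Nat):Int)) b by push_cast; omega)]
        congr 2
        push_cast; omega
      · rw [PySem.List.pyRange_one_eq_nil (by omega),
          PySem.List.pyRange_one_eq_nil (by push_cast; omega)]
        simp

theorem pvEnumMapRange {α : Type} (g : Nat → α) (C : Nat) :
    PySem.List.enumerate ((List.range C).map g) 0 = (List.range C).map (fun k => (Int.ofNat k, g k)) := by
  induction C with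
  | zero => simp [PySem.List.enumerate_nil]
  | succ C ih =>
      rw [List.range_succ, List.map_append, PySem.List.enumerate_append, ih, List.map_append]
      simp [PySem.List.enumerate_cons, PySem.List.enumerate_nil, Int.ofNat_eq_natCast]

-- B's result as the join of per-school block strings
theorem pvAlt_eq (n : Int) :
    generate_school_data_alt n
      = PySem.Str.join "\n"
          (((PySem.List.pyRange 0 (PySem.Int.floordiv (n + 9) 10) 1).map (pvBlock n)).map
            (PySem.Str.join "\n")) := by
  have hd : PySem.Int.floordiv (n + 9) 10 = (n + 9) / 10 :=
    PySem.Int.floordiv_eq_ediv_of_pos (by norm_num)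
  unfold generate_school_data_alt
  show PySem.Str.join "\n"
      ((PySem.List.enumerate
          ((PySem.List.pyRange 0
              ((((PySem.List.pyRange 1 (n + 1) 1).map
                  (fun i => PySem.Int.toStr i ++ " Student_" ++ PySem.Int.toStr i)).length : Int)) 10).map
            (fun p => PySem.List.slice
              ((PySem.List.pyRange 1 (n + 1) 1).map
                (fun i => PySem.Int.toStr i ++ " Student_" ++ PySem.Int.toStr i)) (some p) (some (p + 10)))) 0).map
        (fun kc => "School: School_" ++ PySem.Int.toStr (kc.1 + 1) ++ "\n" ++ PySem.Str.join "\n" kc.2))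
      = _
  set f : Int → String := fun i => PySem.Int.toStr i ++ " Student_" ++ PySem.Int.toStr i with hf
  set students := (PySem.List.pyRange 1 (n + 1) 1).map f with hstud
  have hlen : students.length = n.toNat := by
    rw [hstud, List.length_map, PySem.List.length_pyRange_one]
    omega
  -- the chunk start positions are 10*k for k < S.toNat
  have hpos : PySem.List.pyRange 0 (students.length : Int) 10
      = (List.range (PySem.Int.floordiv (n + 9) 10).toNat).map
          (fun (k : Nat) => (0:Int) + 10 * (k:Int)) := by
    rw [PySem.List.pyRange_of_pos 0 (students.length : Int) (by norm_num), hlen]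
    congr 2
    split_ifs with h
    · omega
    · omega
  -- each chunk is exactly the student lines of school k
  have hchunk : ∀ k : Nat,
      PySem.List.slice students (some ((0:Int) + 10 * (k:Int))) (some ((0:Int) + 10 * (k:Int) + 10))
        = (PySem.List.pyRange ((k:Int) * 10 + 1) (min (((k:Int) + 1) * 10) n + 1) 1).map f := by
    intro k
    have h1 : (0:Int) + 10 * (k:Int) = ((10 * k : Nat) : Int) := by push_cast; ring
    rw [h1, show ((10 * k : Nat) : Int) + 10 = ((10 * k : Nat) : Int) + ((10:Nat) : Int) from by
      push_cast; ring]
    rw [PySem.List.slice_natCast_add, hstud, ← List.map_drop, ← List.map_take,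
      pvRange_drop, pvRange_take]
    rw [show (1 : Int) + ((10 * k : Nat) : Int) = (k:Int) * 10 + 1 from by push_cast; ring,
      show min ((k:Int) * 10 + 1 + ((10:Nat) : Int)) (n + 1) = min (((k:Int) + 1) * 10) n + 1 from by
        push_cast; omega]
  rw [hpos, List.map_map]
  have hchunks : ((List.range (PySem.Int.floordiv (n + 9) 10).toNat).map
        ((fun p => PySem.List.slice students (some p) (some (p + 10)))
          ∘ fun (k : Nat) => (0:Int) + 10 * (k:Int)))
      = (List.range (PySem.Int.floordiv (n + 9) 10).toNat).map
          (fun (k : Nat) =>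
            (PySem.List.pyRange ((k:Int) * 10 + 1) (min (((k:Int) + 1) * 10) n + 1) 1).map f) :=
    List.map_congr_left (fun k _ => hchunk k)
  rw [hchunks, pvEnumMapRange, List.map_map, List.map_map, PySem.List.pyRange_one,
    List.map_map, Int.sub_zero]
  apply congrArg (PySem.Str.join "\n")
  apply List.map_congr_left
  intro k hk
  have hkS : (k : Int) * 10 + 1 ≤ n := by
    have hmem := List.mem_range.mp hk
    omega
  have hne : PySem.List.pyRange ((k:Int) * 10 + 1) (min (((k:Int) + 1) * 10) n + 1) 1 ≠ [] := by
    rw [PySem.List.pyRange_one_cons (by omega)]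
    simp
  show "School: School_" ++ PySem.Int.toStr (Int.ofNat k + 1) ++ "\n"
        ++ PySem.Str.join "\n"
            ((PySem.List.pyRange ((k:Int) * 10 + 1) (min (((k:Int) + 1) * 10) n + 1) 1).map f)
      = PySem.Str.join "\n" (pvBlock n (0 + (k:Int)))
  rw [pvBlock, show (0:Int) + (k:Int) = (k:Int) from by ring,
    pvJoin_cons _ _ (by simpa using hne), Int.ofNat_eq_natCast]

-- ===== VERDICT (by name: the statement is the Claim_ definition above) =====
theorem generate_school_data_spec : Claim_equal_generate_school_data := by
  intro n _
  unfold Spec_generate_school_data generate_school_data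
  have h0 := pvLoopA_eq n (PySem.Int.floordiv (n + 9) 10).toNat 0 [] (by omega)
  push_cast at h0
  rw [h0, pvAlt_eq n,
    pvStrJoinFlat _ (by
      intro g hm
      rcases List.mem_map.mp hm with ⟨s, _, rfl⟩
      simp [pvBlock])]
  simp [List.flatMap_def]
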